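-- pv_equiv track=rewrite | github.com/sclukas/Galaxy_modification_calling | Galaxy_Repo_Version/setup/tools/Pileup2ProfileV5.py | check_if_intron
-- ===== SOURCE A (Python) =====
-- def check_if_intron(pileup_line):
--     """
--     Function checks whether a given line from the pileup file only contains sequence skips (e.g. '<' and '>')
--     :param pileup_line: Given line from the pileup file
--     :return: Boolean value 'is_intron'. True if pileup_line only consists of skips, else false.
--     """
--     is_intron = True
--     pileup_line = pileup_line.split()
--     if len(pileup_line) > 4:  # Check if pileup is empty
--         for symbol in pileup_line[4]:
--             if symbol not in ['<', '>']:
--                 return False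
--     else:
--         return False
--     return is_intron
-- ===== SOURCE B (Python) =====
-- def check_if_intron(pileup_line):
--     # Single pass over the raw characters: count whitespace-separated fields on
--     # the fly and validate the characters of field 5 as they stream by.
--     field = 0
--     in_field = False
--     ok = True
--     for ch in pileup_line:
--         if ch.isspace():
--             in_field = False
--         else:
--             if not in_field:
--                 field += 1
--                 in_field = True
--             if field == 5 and ch not in '<>':
--                 ok = False
--     return ok and field >= 5
-- ===== Notes on version B (the rewrite author's own statement) =====
-- stated objective: alternative
-- what changed: Replaced split()-then-inspect-field-5 by a single character-level scan of the raw line with a field-counting state machine that validates field 5's characters as they stream by, never materialising the field list.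
import Mathlib
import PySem

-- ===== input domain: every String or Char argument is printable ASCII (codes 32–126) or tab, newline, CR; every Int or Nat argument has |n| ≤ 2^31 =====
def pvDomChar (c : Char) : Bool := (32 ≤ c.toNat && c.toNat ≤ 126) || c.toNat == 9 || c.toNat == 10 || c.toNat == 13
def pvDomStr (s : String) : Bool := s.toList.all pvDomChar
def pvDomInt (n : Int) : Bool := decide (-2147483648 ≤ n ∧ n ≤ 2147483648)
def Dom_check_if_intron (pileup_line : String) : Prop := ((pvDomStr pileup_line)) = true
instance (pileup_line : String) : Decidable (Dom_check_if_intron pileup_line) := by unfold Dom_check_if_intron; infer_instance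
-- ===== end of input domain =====

-- B replaces A's split()-then-inspect-field-5 by a single character-level scan with a
-- field-counting state machine (alternative decomposition, same cost).

-- ===== PORT A =====
-- the for-loop over pileup_line[4]: returns false at the first non-skip symbol, true at the end
def checkA_loop : List Char → Bool
  | [] => true
  | c :: rest => if ¬ (c = '<' ∨ c = '>') then false else checkA_loop rest

def check_if_intron (pileup_line : String) : Bool :=
  let fields := PySem.Str.split₀ pileup_line
  if fields.length > 4 then checkA_loop (PySem.List.pyGetD fields 4 "").toList
  else false

-- ===== PORT B =====
-- the for-loop of Source B: state (field, in_field, ok), one step per character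
def scanB : List Char → Nat → Bool → Bool → Bool
  | [], field, _, ok => ok && decide (5 ≤ field)
  | c :: rest, field, inF, ok =>
    if PySem.Chars.isspace c then scanB rest field false ok
    else
      let field' := if inF then field else field + 1
      let ok' := if field' = 5 && !(c == '<' || c == '>') then false else ok
      scanB rest field' true ok'

def check_if_intron_alt (pileup_line : String) : Bool :=
  scanB pileup_line.toList 0 false true

-- ===== PRECONDITION & SPEC =====
def Spec_check_if_intron (pileup_line : String) (out : Bool) : Prop := out = check_if_intron_alt pileup_line
instance (pileup_line : String) (out : Bool) : Decidable (Spec_check_if_intron pileup_line out) := by unfold Spec_check_if_intron; infer_instance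

-- ===== CLAIM (what is proved, stated in full; the proofs are below) =====
def Claim_equal_check_if_intron : Prop := ∀ (pileup_line : String), Dom_check_if_intron pileup_line → Spec_check_if_intron pileup_line (check_if_intron pileup_line)

-- ===== LEMMAS AND PROOFS =====

def skipc (c : Char) : Bool := c == '<' || c == '>'

-- A's result as a function of the char-level field list
def resA (fields : List (List Char)) : Bool :=
  decide (fields.length > 4) && (fields.getD 4 []).all skipc

-- the value B's 'ok' flag holds at the state (acc, cur) of split₀.go
def okSpec (acc : List (List Char)) (cur : List Char) : Bool :=
  if 5 ≤ acc.length then (acc.getD (acc.length - 5) []).all skipc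
  else if acc.length = 4 then cur.all skipc
  else true

theorem checkA_loop_eq_all (cs : List Char) : checkA_loop cs = cs.all skipc := by
  induction cs with
  | nil => rfl
  | cons c rest ih =>
    by_cases h : c = '<' ∨ c = '>'
    · have hs : skipc c = true := by rcases h with rfl | rfl <;> rfl
      simp [checkA_loop, h, ih, hs]
    · have hs : skipc c = false := by
        simp only [skipc, Bool.or_eq_false_iff, beq_eq_false_iff_ne]
        exact ⟨fun e => h (Or.inl e), fun e => h (Or.inr e)⟩
      simp [checkA_loop, h, hs]

theorem getD4_reverse (full : List (List Char)) (h : 5 ≤ full.length) :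
    full.reverse.getD 4 [] = full.getD (full.length - 5) [] := by
  rw [List.getD_eq_getElem _ _ (by simp only [List.length_reverse]; omega),
      List.getD_eq_getElem _ _ (by omega)]
  rw [List.getElem_reverse]
  simp only [show full.length - 1 - 4 = full.length - 5 from by omega]

-- the ok-update of one non-space character
theorem okSpec_cons (acc : List (List Char)) (cur : List Char) (c : Char) :
    (if (acc.length + 1 = 5) && !(c == '<' || c == '>') then false else okSpec acc cur)
      = okSpec acc (c :: cur) := by
  unfold okSpec
  by_cases h4 : acc.length = 4
  · by_cases hc : (c == '<' || c == '>') = true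
    · simp [h4, hc, skipc]
    · simp only [Bool.not_eq_true] at hc
      simp [h4, hc, skipc]
  · have h5' : ¬ (acc.length + 1 = 5) := by omega
    by_cases h5 : 5 ≤ acc.length
    · simp [h5', h5]
    · simp [h5', h5, h4]

-- the ok flag is unchanged when a completed field is pushed onto acc
theorem okSpec_push (acc : List (List Char)) (cur : List Char) :
    okSpec acc cur = okSpec (cur.reverse :: acc) [] := by
  unfold okSpec
  by_cases h5 : 5 ≤ acc.length
  · simp only [List.length_cons, if_pos h5, if_pos (show 5 ≤ acc.length + 1 by omega)]
    rw [show acc.length + 1 - 5 = (acc.length - 5) + 1 by omega]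
    simp [List.getD]
  · by_cases h4 : acc.length = 4
    · simp [h4, List.all_reverse, List.getD]
    · simp only [List.length_cons, if_neg h5, if_neg h4,
        if_neg (show ¬ 5 ≤ acc.length + 1 by omega)]
      split_ifs <;> rfl

theorem scan_go (cs : List Char) : ∀ (cur : List Char) (acc : List (List Char)),
    scanB cs (acc.length + (if cur.isEmpty then 0 else 1)) (!cur.isEmpty) (okSpec acc cur)
      = resA (PySem.Chars.split₀.go cs cur acc) := by
  induction cs with
  | nil =>
    intro cur acc
    cases cur with
    | nil =>
      rw [show PySem.Chars.split₀.go [] [] acc = acc.reverse from by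
        simp [PySem.Chars.split₀.go]]
      show (okSpec acc [] && decide (5 ≤ acc.length + 0)) = resA acc.reverse
      unfold resA okSpec
      simp only [List.length_reverse, Nat.add_zero]
      by_cases h5 : 5 ≤ acc.length
      · rw [getD4_reverse acc h5]
        simp [h5, show 4 < acc.length by omega]
      · simp [h5, show ¬ 4 < acc.length by omega]
    | cons x xs =>
      rw [show PySem.Chars.split₀.go [] (x :: xs) acc = ((x :: xs).reverse :: acc).reverse from by
        simp [PySem.Chars.split₀.go]]
      show (okSpec acc (x :: xs) && decide (5 ≤ acc.length + 1))
          = resA ((x :: xs).reverse :: acc).reverse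
      unfold resA okSpec
      simp only [List.length_reverse, List.length_cons]
      by_cases h4 : acc.length = 4
      · rw [getD4_reverse _ (by simp only [List.length_cons]; omega)]
        simp only [List.length_cons]
        rw [show acc.length + 1 - 5 = 0 from by omega]
        simp [h4, List.all_reverse, Bool.and_comm, List.getD]
      · by_cases h5 : 5 ≤ acc.length
        · rw [getD4_reverse _ (by simp only [List.length_cons]; omega)]
          simp only [List.length_cons]
          rw [show acc.length + 1 - 5 = (acc.length - 5) + 1 from by omega]
          simp [h5, show 4 < acc.length + 1 by omega, List.getD,
            show 4 ≤ acc.length by omega]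
        · simp [h4, h5, show ¬ 4 < acc.length + 1 by omega,
            show ¬ 5 ≤ acc.length + 1 by omega]
  | cons c rest ih =>
    intro cur acc
    by_cases hsp : PySem.Chars.isspace c = true
    · cases cur with
      | nil =>
        rw [show PySem.Chars.split₀.go (c :: rest) [] acc = PySem.Chars.split₀.go rest [] acc
          from by simp [PySem.Chars.split₀.go, hsp]]
        show scanB (c :: rest) (acc.length + 0) false (okSpec acc [])
            = resA (PySem.Chars.split₀.go rest [] acc)
        rw [show scanB (c :: rest) (acc.length + 0) false (okSpec acc [])
            = scanB rest (acc.length + 0) false (okSpec acc []) from by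
          simp [scanB, hsp]]
        simpa using ih [] acc
      | cons x xs =>
        rw [show PySem.Chars.split₀.go (c :: rest) (x :: xs) acc
            = PySem.Chars.split₀.go rest [] ((x :: xs).reverse :: acc) from by
          simp [PySem.Chars.split₀.go, hsp]]
        show scanB (c :: rest) (acc.length + 1) true (okSpec acc (x :: xs))
            = resA (PySem.Chars.split₀.go rest [] ((x :: xs).reverse :: acc))
        rw [show scanB (c :: rest) (acc.length + 1) true (okSpec acc (x :: xs))
            = scanB rest (acc.length + 1) false (okSpec acc (x :: xs)) from by
          simp [scanB, hsp]]
        rw [okSpec_push acc (x :: xs)]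
        have := ih [] ((x :: xs).reverse :: acc)
        simpa using this
    · have hsp' : PySem.Chars.isspace c = false := by simpa using hsp
      cases cur with
      | nil =>
        rw [show PySem.Chars.split₀.go (c :: rest) [] acc
            = PySem.Chars.split₀.go rest [c] acc from by
          simp [PySem.Chars.split₀.go, hsp']]
        show scanB (c :: rest) (acc.length + 0) false (okSpec acc [])
            = resA (PySem.Chars.split₀.go rest [c] acc)
        rw [show scanB (c :: rest) (acc.length + 0) false (okSpec acc [])
            = scanB rest (acc.length + 0 + 1) true
                (if (acc.length + 0 + 1 = 5) && !(c == '<' || c == '>') then false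
                 else okSpec acc []) from by
          simp [scanB, hsp']]
        simp only [Nat.add_zero]
        rw [okSpec_cons acc [] c]
        have := ih [c] acc
        simpa using this
      | cons x xs =>
        rw [show PySem.Chars.split₀.go (c :: rest) (x :: xs) acc
            = PySem.Chars.split₀.go rest (c :: x :: xs) acc from by
          simp [PySem.Chars.split₀.go, hsp']]
        show scanB (c :: rest) (acc.length + 1) true (okSpec acc (x :: xs))
            = resA (PySem.Chars.split₀.go rest (c :: x :: xs) acc)
        rw [show scanB (c :: rest) (acc.length + 1) true (okSpec acc (x :: xs))
            = scanB rest (acc.length + 1) true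
                (if (acc.length + 1 = 5) && !(c == '<' || c == '>') then false
                 else okSpec acc (x :: xs)) from by
          simp [scanB, hsp']]
        rw [okSpec_cons acc (x :: xs) c]
        have := ih (c :: x :: xs) acc
        simpa using this

-- bridge: A's port equals resA on the field list (as lists of characters)
theorem check_eq_resA (s : String) :
    check_if_intron s = resA ((PySem.Str.split₀ s).map String.toList) := by
  unfold check_if_intron resA
  simp only [List.length_map]
  by_cases h : (PySem.Str.split₀ s).length > 4
  · rw [if_pos h, checkA_loop_eq_all]
    have h1 : PySem.List.pyGetD (PySem.Str.split₀ s) 4 "" = (PySem.Str.split₀ s)[4] := by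
      simp [PySem.List.pyGetD, PySem.List.pyGet?, PySem.List.pyIdx?, h]
    have h2 : ((PySem.Str.split₀ s).map String.toList).getD 4 [] = (PySem.Str.split₀ s)[4].toList := by
      rw [List.getD_eq_getElem _ _ (by simp only [List.length_map]; exact h)]
      exact List.getElem_map String.toList
    rw [h1, h2]
    simp [h]
  · rw [if_neg h]
    simp [h]

-- ===== VERDICT (by name: the statement is the Claim_ definition above) =====
theorem check_if_intron_spec : Claim_equal_check_if_intron := by
  intro s _
  unfold Spec_check_if_intron check_if_intron_alt
  rw [check_eq_resA, PySem.Str.split₀_map_toList]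
  have := scan_go s.toList [] []
  simpa [PySem.Chars.split₀, okSpec] using this.symm
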